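-- pv_equiv track=rewrite | github.com/Harmeek-19/Security-Infrastructure-Automation-Platform | reporting/report_generator.py | _clean_evidence
-- ===== SOURCE A (Python) =====
-- def _clean_evidence(evidence):
--     """Clean up repetitive content in evidence"""
--     if not evidence:
--         return ""
--
--     # Split by newlines
--     lines = evidence.split('\n')
--
--     # Store unique evidence items with counts
--     unique_lines = []
--     seen_patterns = {}
--
--     for line in lines:
--         line = line.strip()
--         if not line:
--             continue
--
--         # Extract the pattern (e.g., "nginx/1.19.0" from "zap: nginx/1.19.0")
--         if ': ' in line:
--             prefix, pattern = line.split(': ', 1)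
--             processed_line = f"{prefix}: {pattern}"
--         else:
--             prefix, pattern = "", line
--             processed_line = line
--
--         # Use lowercase for matching but preserve original case for display
--         pattern_key = pattern.lower()
--
--         # Track this pattern
--         if pattern_key in seen_patterns:
--             seen_patterns[pattern_key]['count'] += 1
--
--             # Only keep a maximum of 2 examples per pattern
--             if seen_patterns[pattern_key]['count'] <= 2:
--                 unique_lines.append(processed_line)
--         else:
--             seen_patterns[pattern_key] = {
--                 'count': 1,
--                 'line': processed_line
--             }
--             unique_lines.append(processed_line)
--
--     # Add counts for patterns with more than 2 occurrences
--     result_lines = []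
--
--     # First add all the unique lines we want to keep
--     for line in unique_lines:
--         result_lines.append(line)
--
--     # Then add summary counts for patterns with more occurrences
--     for pattern, info in seen_patterns.items():
--         if info['count'] > 2:
--             extra_count = info['count'] - 2
--             if extra_count > 0:
--                 # Extract prefix from the line to maintain consistency
--                 if ': ' in info['line']:
--                     prefix = info['line'].split(': ', 1)[0]
--                     result_lines.append(f"{prefix}: ... and {extra_count} more similar items")
--                 else:
--                     result_lines.append(f"... and {extra_count} more similar items")
--
--     # Rejoin lines, limit overall size
--     result = '\n'.join(result_lines)
--
--     # If still too long, truncate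
--     if len(result) > 500:
--         result = result[:497] + '...'
--
--     return result
-- ===== SOURCE B (Python) =====
-- def _clean_evidence(evidence):
--     """Clean up repetitive content in evidence (two-pass: count first, then emit)."""
--     stripped = [ln.strip() for ln in evidence.split('\n')]
--
--     # Pass 1: total occurrences of each pattern key.
--     totals = {}
--     for ln in stripped:
--         if ln:
--             pat = ln.split(': ', 1)[1] if ': ' in ln else ln
--             key = pat.lower()
--             totals[key] = totals.get(key, 0) + 1
--
--     # Pass 2: keep at most two examples per key; on a key's first occurrence
--     # with more than two total occurrences, record a summary line.
--     kept, summaries, emitted = [], [], {}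
--     for ln in stripped:
--         if not ln:
--             continue
--         has_sep = ': ' in ln
--         prefix, pat = ln.split(': ', 1) if has_sep else ('', ln)
--         key = pat.lower()
--         n = emitted.get(key, 0) + 1
--         emitted[key] = n
--         if n <= 2:
--             kept.append(ln)
--         if n == 1 and totals[key] > 2:
--             tail = '... and %d more similar items' % (totals[key] - 2)
--             summaries.append(prefix + ': ' + tail if has_sep else tail)
--
--     result = '\n'.join(kept + summaries)
--     return result[:497] + '...' if len(result) > 500 else result
-- ===== Notes on version B (the rewrite author's own statement) =====
-- stated objective: alternative
-- what changed: Replaced A's single accumulating pass over a dict of {count,line} records plus a final iteration over that dict with a two-pass scheme: a first pass counts each pattern key, and a second pass emits kept lines and records each summary immediately at a key's first occurrence, so no per-key record objects or post-hoc dict traversal are needed.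
import Mathlib
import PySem

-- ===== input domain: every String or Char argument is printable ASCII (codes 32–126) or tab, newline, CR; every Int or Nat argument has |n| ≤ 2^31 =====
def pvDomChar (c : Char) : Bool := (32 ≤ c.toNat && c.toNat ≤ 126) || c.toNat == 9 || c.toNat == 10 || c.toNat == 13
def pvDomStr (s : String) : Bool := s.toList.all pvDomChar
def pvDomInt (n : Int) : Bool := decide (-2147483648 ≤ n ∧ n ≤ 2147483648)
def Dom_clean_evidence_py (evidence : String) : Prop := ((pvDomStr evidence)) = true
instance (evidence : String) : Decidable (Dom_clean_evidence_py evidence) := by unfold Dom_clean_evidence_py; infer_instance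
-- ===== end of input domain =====

-- B (the _alt port) restructures A's single pass + dict-of-records + final dict walk into
-- two passes: first count every pattern key, then emit kept lines and record each summary
-- at its key's first occurrence; same return value (objective: alternative decomposition).

-- ===== PORT A =====
-- Port of A, step for step, over List Char ('\n'-split, strip, ': '-split, lower via PySem).
-- 'prefix, pattern = line.split(': ', 1)' always yields exactly two pieces here (': ' is in
-- line), ported as the head and second element of the split list, which is exact.
-- 'result[:497]' is List.take 497 (exact: nonnegative slice bound), len(result) is length.
def clean_evidence_py (evidence : String) : String :=
  let cs := evidence.toList
  if cs = [] then ""                                            -- 'if not evidence: return ""'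
  else
    let lines := PySem.Chars.splitOn cs ['\n']
    let st := lines.foldl (fun (st : List (List Char) × PySem.Dict (List Char) (Int × List Char)) rawline =>
      let line := PySem.Chars.strip rawline
      if line = [] then st                                      -- 'if not line: continue'
      else
        let pp : List Char × List Char :=
          if PySem.Chars.isIn [':', ' '] line then
            let ps := PySem.Chars.splitOnMax line [':', ' '] 1
            (ps.headD [], ps.getD 1 [])
          else ([], line)
        let processed := if PySem.Chars.isIn [':', ' '] line
          then pp.1 ++ [':', ' '] ++ pp.2                        -- f"{prefix}: {pattern}"
          else line
        let patternKey := PySem.Chars.lower pp.2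
        match st.2.get? patternKey with
        | some info =>
            let info' : Int × List Char := (info.1 + 1, info.2)  -- count += 1 (in place)
            let seen' := st.2.insert patternKey info'
            if info'.1 ≤ 2 then (st.1 ++ [processed], seen') else (st.1, seen')
        | none =>
            (st.1 ++ [processed], st.2.insert patternKey (1, processed))
      ) ([], PySem.Dict.empty)
    let result_lines := st.2.items.foldl (fun acc kv =>
      if kv.2.1 > 2 then
        let extra := kv.2.1 - 2
        if extra > 0 then
          if PySem.Chars.isIn [':', ' '] kv.2.2 then
            acc ++ [(PySem.Chars.splitOnMax kv.2.2 [':', ' '] 1).headD []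
                    ++ [':', ' '] ++ ("... and ".toList ++ PySem.Int.toChars extra ++ " more similar items".toList)]
          else
            acc ++ ["... and ".toList ++ PySem.Int.toChars extra ++ " more similar items".toList]
        else acc
      else acc) st.1
    let result := PySem.Chars.join ['\n'] result_lines
    if (result.length : Int) > 500 then String.ofList (result.take 497 ++ "...".toList)
    else String.ofList result

-- ===== PORT B =====
-- Port of Source B, step for step: pass 1 builds the totals dict, pass 2 keeps lines and
-- records summaries at first occurrences.  'totals[key]' is exact as getD: pass 1 put
-- every key of pass 2 into totals.  Same exact split/slice notes as in port A.
def clean_evidence_py_alt (evidence : String) : String :=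
  let stripped := (PySem.Chars.splitOn evidence.toList ['\n']).map PySem.Chars.strip
  let totals := stripped.foldl (fun (d : PySem.Dict (List Char) Int) ln =>
      if ln = [] then d
      else
        let pat := if PySem.Chars.isIn [':', ' '] ln
          then (PySem.Chars.splitOnMax ln [':', ' '] 1).getD 1 [] else ln
        let key := PySem.Chars.lower pat
        d.insert key (d.getD key 0 + 1)
    ) PySem.Dict.empty
  let st := stripped.foldl (fun (st : List (List Char) × List (List Char) × PySem.Dict (List Char) Int) ln =>
      if ln = [] then st
      else
        let hasSep := PySem.Chars.isIn [':', ' '] ln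
        let pp : List Char × List Char :=
          if hasSep then
            let ps := PySem.Chars.splitOnMax ln [':', ' '] 1
            (ps.headD [], ps.getD 1 [])
          else ([], ln)
        let key := PySem.Chars.lower pp.2
        let n := st.2.2.getD key 0 + 1
        let kept := if n ≤ 2 then st.1 ++ [ln] else st.1
        let summaries :=
          if n = 1 ∧ 2 < totals.getD key 0 then
            let tail := "... and ".toList ++ PySem.Int.toChars (totals.getD key 0 - 2) ++ " more similar items".toList
            st.2.1 ++ [if hasSep then pp.1 ++ [':', ' '] ++ tail else tail]
          else st.2.1
        (kept, summaries, st.2.2.insert key n)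
    ) ([], [], PySem.Dict.empty)
  let result := PySem.Chars.join ['\n'] (st.1 ++ st.2.1)
  if (result.length : Int) > 500 then String.ofList (result.take 497 ++ "...".toList)
  else String.ofList result

-- ===== PRECONDITION & SPEC =====
def Spec_clean_evidence_py (evidence : String) (out : String) : Prop := out = clean_evidence_py_alt evidence
instance (evidence : String) (out : String) : Decidable (Spec_clean_evidence_py evidence out) := by unfold Spec_clean_evidence_py; infer_instance

-- ===== CLAIM (what is proved, stated in full; the proofs are below) =====
def Claim_equal_clean_evidence_py : Prop := ∀ (evidence : String), Dom_clean_evidence_py evidence → Spec_clean_evidence_py evidence (clean_evidence_py evidence)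

-- ===== LEMMAS AND PROOFS =====

lemma go_zero (sep : List Char) (fuel : Nat) (l : List Char) (acc : List (List Char)) (hf : 0 < fuel) :
    PySem.Chars.splitOnMax.go sep fuel 0 l [] acc = (l :: acc).reverse := by
  obtain ⟨f, rfl⟩ : ∃ f, fuel = f + 1 := ⟨fuel - 1, by omega⟩
  cases l with
  | nil => simp [PySem.Chars.splitOnMax.go]
  | cons c rest => simp [PySem.Chars.splitOnMax.go]

lemma go_one_pos (sep : List Char) (hsep : sep ≠ []) :
    ∀ (fuel : Nat) (l cur : List Char) (acc : List (List Char)), l.length < fuel →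
    ∀ (h : ∃ j, sep <+: l.drop j),
    PySem.Chars.splitOnMax.go sep fuel 1 l cur acc =
      acc.reverse ++ [cur.reverse ++ l.take (Nat.find h), l.drop (Nat.find h + sep.length)] := by
  intro fuel
  induction fuel with
  | zero => intro l cur acc hf; omega
  | succ f ih =>
    intro l cur acc hf h
    cases l with
    | nil =>
      exfalso; obtain ⟨j, hj⟩ := h
      simp at hj
      exact hsep hj
    | cons c rest =>
      by_cases hp : sep.isPrefixOf (c :: rest)
      · have hfind : Nat.find h = 0 := by
          rw [Nat.find_eq_zero]; simpa [List.IsPrefix] using (List.isPrefixOf_iff_prefix.mp hp)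
        simp only [PySem.Chars.splitOnMax.go, hp, if_true]
        rw [go_zero sep f _ _ (by simp at hf ⊢; omega)]
        simp [hfind]
      · have h' : ∃ j, sep <+: rest.drop j := by
          obtain ⟨j, hj⟩ := h
          cases j with
          | zero => exact absurd (List.isPrefixOf_iff_prefix.mpr (by simpa using hj)) hp
          | succ j => exact ⟨j, by simpa using hj⟩
        have hfind : Nat.find h = Nat.find h' + 1 := by
          rw [Nat.find_eq_iff]
          constructor
          · simpa using Nat.find_spec h'
          · intro i hi
            cases i with
            | zero => simpa using fun hc => hp (List.isPrefixOf_iff_prefix.mpr hc)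
            | succ i => simpa using Nat.find_min h' (by omega)
        simp only [PySem.Chars.splitOnMax.go, hp]
        have := ih rest (c :: cur) acc (by simp at hf ⊢; omega) h'
        simp only [this, hfind]
        rw [show Nat.find h' + 1 + sep.length = (Nat.find h' + sep.length) + 1 by omega]
        simp

lemma splitSep_recon (l : List Char) (h : PySem.Chars.isIn [':', ' '] l = true) :
    ∃ a b, PySem.Chars.splitOnMax l [':', ' '] 1 = [a, b] ∧ a ++ [':', ' '] ++ b = l := by
  have hex : ∃ j, [':', ' '] <+: l.drop j := (PySem.Chars.exists_prefix_drop_iff_isIn _ _).mpr h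
  have hsp : PySem.Chars.splitOnMax l [':', ' '] 1 =
      [l.take (Nat.find hex), l.drop (Nat.find hex + 2)] := by
    rw [PySem.Chars.splitOnMax, if_neg (by norm_num)]
    simp only [Int.toNat_one]
    rw [go_one_pos [':', ' '] (by simp) (l.length + 1) l [] [] (by omega) hex]
    simp
  refine ⟨_, _, hsp, ?_⟩
  obtain ⟨t, ht⟩ := Nat.find_spec hex
  have h1 : l.take (Nat.find hex) ++ l.drop (Nat.find hex) = l := List.take_append_drop _ _
  have h2 : l.drop (Nat.find hex + 2) = t := by
    have hd : l.drop (Nat.find hex + 2) = (l.drop (Nat.find hex)).drop 2 := by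
      rw [List.drop_drop]
    rw [hd, ← ht]
    simp
  calc l.take (Nat.find hex) ++ [':', ' '] ++ l.drop (Nat.find hex + 2)
      = l.take (Nat.find hex) ++ ([':', ' '] ++ t) := by rw [h2]; simp
    _ = l.take (Nat.find hex) ++ l.drop (Nat.find hex) := by rw [ht]
    _ = l := h1

lemma proc_eq (l : List Char) :
    (if PySem.Chars.isIn [':', ' '] l then
      (PySem.Chars.splitOnMax l [':', ' '] 1).headD [] ++ [':', ' ']
        ++ (PySem.Chars.splitOnMax l [':', ' '] 1).getD 1 []
     else l) = l := by
  by_cases h : PySem.Chars.isIn [':', ' '] l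
  · obtain ⟨a, b, hs, hr⟩ := splitSep_recon l h
    simp [h, hs]
    simpa using hr
  · simp [h]


lemma contains_eq_false_of_get?_none {ν : Type} (d : PySem.Dict (List Char) ν) (k : List Char)
    (h : d.get? k = none) : d.contains k = false := by
  simp only [PySem.Dict.get?, Option.map_eq_none_iff, List.find?_eq_none] at h
  simp only [PySem.Dict.contains, List.any_eq_false]
  exact fun p hp => by simpa using h p hp

lemma items_insert_none {ν : Type} (d : PySem.Dict (List Char) ν) (k : List Char) (v : ν)
    (h : d.get? k = none) : (d.insert k v).items = d.items ++ [(k, v)] := by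
  simp [PySem.Dict.insert, contains_eq_false_of_get?_none d k h]

lemma contains_eq_true_of_get?_some {ν : Type} (d : PySem.Dict (List Char) ν) (k : List Char) (w : ν)
    (h : d.get? k = some w) : d.contains k = true := by
  simp only [PySem.Dict.get?, Option.map_eq_some_iff] at h
  obtain ⟨p, hp, -⟩ := h
  simp only [PySem.Dict.contains, List.any_eq_true]
  exact ⟨p, List.mem_of_find?_eq_some hp, List.find?_eq_some_iff_append.mp hp |>.1⟩

lemma items_insert_some {ν : Type} (d : PySem.Dict (List Char) ν) (k : List Char) (v w : ν)
    (h : d.get? k = some w) :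
    (d.insert k v).items = d.items.map (fun p => if p.1 == k then (k, v) else p) := by
  simp [PySem.Dict.insert, contains_eq_true_of_get?_some d k w h]

lemma get?_none_notmem {ν : Type} (d : PySem.Dict (List Char) ν) (k : List Char)
    (h : d.get? k = none) : k ∉ d.items.map Prod.fst := by
  simp only [PySem.Dict.get?, Option.map_eq_none_iff, List.find?_eq_none] at h
  intro hmem
  obtain ⟨p, hp, hk⟩ := List.mem_map.mp hmem
  exact (by simpa using h p hp : ¬ p.1 = k) hk

lemma find_unique {ν : Type} (items : List (List Char × ν)) (p : List Char × ν)
    (hn : (items.map Prod.fst).Nodup) (hm : p ∈ items) :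
    items.find? (fun q => q.1 == p.1) = some p := by
  induction items with
  | nil => simp at hm
  | cons x xs ih =>
    simp only [List.map_cons, List.nodup_cons] at hn
    rcases List.mem_cons.mp hm with rfl | hm'
    · simp [List.find?]
    · have hx : ¬ (x.1 == p.1) = true := by
        simp only [beq_iff_eq]
        intro he
        exact hn.1 (he ▸ List.mem_map.mpr ⟨p, hm', rfl⟩)
      simp only [List.find?, hx]
      exact ih hn.2 hm'

lemma get?_of_mem_nodup {ν : Type} (d : PySem.Dict (List Char) ν) (p : List Char × ν)
    (hn : (d.items.map Prod.fst).Nodup) (hm : p ∈ d.items) : d.get? p.1 = some p.2 := by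
  simp [PySem.Dict.get?, find_unique d.items p hn hm]

-- Proof-side abbreviations: the pattern key of a stripped line, the summary line built
-- from a first-seen line, the list of stripped nonempty lines, and the final join+truncate.
def keyCE (l : List Char) : List Char :=
  PySem.Chars.lower (if PySem.Chars.isIn [':', ' '] l then (PySem.Chars.splitOnMax l [':', ' '] 1).getD 1 [] else l)

def tailCE (extra : Int) : List Char :=
  "... and ".toList ++ PySem.Int.toChars extra ++ " more similar items".toList

def sumCE (l : List Char) (extra : Int) : List Char :=
  if PySem.Chars.isIn [':', ' '] l then
    (PySem.Chars.splitOnMax l [':', ' '] 1).headD [] ++ [':', ' '] ++ tailCE extra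
  else tailCE extra

def ECE (evidence : String) : List (List Char) :=
  ((PySem.Chars.splitOn evidence.toList ['\n']).map PySem.Chars.strip).filter (fun l => decide ¬(l = []))

def finishCE (ls : List (List Char)) : String :=
  let result := PySem.Chars.join ['\n'] ls
  if (result.length : Int) > 500 then String.ofList (result.take 497 ++ "...".toList)
  else String.ofList result

def stepA (st : List (List Char) × PySem.Dict (List Char) (Int × List Char)) (l : List Char) :
    List (List Char) × PySem.Dict (List Char) (Int × List Char) :=
  match st.2.get? (keyCE l) with
  | some info =>
      let seen' := st.2.insert (keyCE l) (info.1 + 1, info.2)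
      if info.1 + 1 ≤ 2 then (st.1 ++ [l], seen') else (st.1, seen')
  | none => (st.1 ++ [l], st.2.insert (keyCE l) (1, l))

def stepB (T : PySem.Dict (List Char) Int)
    (st : List (List Char) × List (List Char) × PySem.Dict (List Char) Int) (l : List Char) :
    List (List Char) × List (List Char) × PySem.Dict (List Char) Int :=
  let n := st.2.2.getD (keyCE l) 0 + 1
  ((if n ≤ 2 then st.1 ++ [l] else st.1),
   (if n = 1 ∧ 2 < T.getD (keyCE l) 0 then st.2.1 ++ [sumCE l (T.getD (keyCE l) 0 - 2)] else st.2.1),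
   st.2.2.insert (keyCE l) n)


lemma get?_proj (em : PySem.Dict (List Char) Int) (d : PySem.Dict (List Char) (Int × List Char))
    (h : em.items = d.items.map (fun p => (p.1, p.2.1))) (k : List Char) :
    em.get? k = (d.get? k).map (fun w => w.1) := by
  simp only [PySem.Dict.get?, h, List.find?_map]
  rw [show ((fun (q : List Char × Int) => q.1 == k) ∘
        (fun (p : List Char × (Int × List Char)) => (p.1, p.2.1))) = (fun p => p.1 == k) from rfl]
  cases hf : List.find? (fun p => p.1 == k) d.items <;> simp [hf]

lemma mem_of_get?_some {ν : Type} (d : PySem.Dict (List Char) ν) (k : List Char) (w : ν)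
    (h : d.get? k = some w) : (k, w) ∈ d.items := by
  simp only [PySem.Dict.get?, Option.map_eq_some_iff] at h
  obtain ⟨p, hp, hw⟩ := h
  have hk : p.1 = k := by simpa using List.find?_eq_some_iff_append.mp hp |>.1
  have : p = (k, w) := by cases p; simp_all
  exact this ▸ List.mem_of_find?_eq_some hp

def InvCE (T : PySem.Dict (List Char) Int)
    (sa : List (List Char) × PySem.Dict (List Char) (Int × List Char))
    (sb : List (List Char) × List (List Char) × PySem.Dict (List Char) Int) : Prop :=
  sb.1 = sa.1 ∧
  sb.2.2.items = sa.2.items.map (fun p => (p.1, p.2.1)) ∧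
  sb.2.1 = ((sa.2.items.map (fun p => (p.1, p.2.2))).filter
              (fun q => decide (2 < T.getD q.1 0))).map
            (fun q => sumCE q.2 (T.getD q.1 0 - 2)) ∧
  (sa.2.items.map Prod.fst).Nodup ∧
  (∀ p ∈ sa.2.items, 1 ≤ p.2.1)

lemma inv_step (T : PySem.Dict (List Char) Int)
    (sa : List (List Char) × PySem.Dict (List Char) (Int × List Char))
    (sb : List (List Char) × List (List Char) × PySem.Dict (List Char) Int) (l : List Char)
    (h : InvCE T sa sb) : InvCE T (stepA sa l) (stepB T sb l) := by
  obtain ⟨h1, h2, h3, h4, h5⟩ := h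
  have hget : sb.2.2.get? (keyCE l) = (sa.2.get? (keyCE l)).map (fun w => w.1) :=
    get?_proj _ _ h2 _
  cases hd : sa.2.get? (keyCE l) with
  | none =>
    have hbn : sb.2.2.get? (keyCE l) = none := by rw [hget, hd]; rfl
    have hgD : sb.2.2.getD (keyCE l) 0 = 0 := by simp [PySem.Dict.getD, hbn]
    have hA : stepA sa l = (sa.1 ++ [l], sa.2.insert (keyCE l) (1, l)) := by
      simp [stepA, hd]
    have hB : stepB T sb l =
        (sb.1 ++ [l],
         (if 2 < T.getD (keyCE l) 0 then sb.2.1 ++ [sumCE l (T.getD (keyCE l) 0 - 2)] else sb.2.1),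
         sb.2.2.insert (keyCE l) 1) := by
      simp [stepB, hgD]
    rw [hA, hB]
    have hiA : (sa.2.insert (keyCE l) (1, l)).items = sa.2.items ++ [(keyCE l, (1, l))] :=
      items_insert_none _ _ _ hd
    have hiB : (sb.2.2.insert (keyCE l) 1).items = sb.2.2.items ++ [(keyCE l, 1)] :=
      items_insert_none _ _ _ hbn
    refine ⟨by simp [h1], ?_, ?_, ?_, ?_⟩
    · simp [hiA, hiB, h2]
    · simp only [hiA, List.map_append, List.filter_append, List.map_append, h3]
      by_cases hT : 2 < T.getD (keyCE l) 0 <;> simp [hT]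
    · simp only [hiA, List.map_append, List.nodup_append]
      refine ⟨h4, by simp, ?_⟩
      intro a ha b hb
      have hb' : b = keyCE l := by simpa using hb
      subst hb'
      intro hab
      exact get?_none_notmem _ _ hd (hab ▸ ha)
    · intro p hp
      rw [hiA] at hp
      rcases List.mem_append.mp hp with hp' | hp'
      · exact h5 p hp'
      · have : p = (keyCE l, (1, l)) := by simpa using hp'
        subst this
        norm_num
  | some w =>
    obtain ⟨c, fl⟩ := w
    have hmem : (keyCE l, (c, fl)) ∈ sa.2.items := mem_of_get?_some _ _ _ hd
    have hc1 : (1:Int) ≤ c := h5 _ hmem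
    have hbs : sb.2.2.get? (keyCE l) = some c := by rw [hget, hd]; rfl
    have hgD : sb.2.2.getD (keyCE l) 0 = c := by simp [PySem.Dict.getD, hbs]
    have huniq : ∀ p ∈ sa.2.items, p.1 = keyCE l → p = (keyCE l, (c, fl)) := by
      intro p hp hpk
      have hfind := find_unique sa.2.items p h4 hp
      have : sa.2.get? p.1 = some p.2 := by simp [PySem.Dict.get?, hfind]
      rw [hpk, hd] at this
      cases p
      simp_all
    have hA : stepA sa l =
        ((if c + 1 ≤ 2 then sa.1 ++ [l] else sa.1), sa.2.insert (keyCE l) (c + 1, fl)) := by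
      simp only [stepA, hd]
      by_cases hcc : c + 1 ≤ 2 <;> simp [hcc]
    have hB : stepB T sb l =
        ((if c + 1 ≤ 2 then sb.1 ++ [l] else sb.1), sb.2.1, sb.2.2.insert (keyCE l) (c + 1)) := by
      simp only [stepB, hgD]
      have hn1 : ¬ (c + 1 = 1) := by omega
      by_cases hcc : c + 1 ≤ 2 <;> simp [hcc, hn1]
    rw [hA, hB]
    have hiA : (sa.2.insert (keyCE l) (c + 1, fl)).items =
        sa.2.items.map (fun p => if p.1 == keyCE l then (keyCE l, (c + 1, fl)) else p) :=
      items_insert_some _ _ _ _ hd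
    have hiB : (sb.2.2.insert (keyCE l) (c + 1)).items =
        sb.2.2.items.map (fun p => if p.1 == keyCE l then (keyCE l, c + 1) else p) :=
      items_insert_some _ _ _ _ hbs
    refine ⟨by by_cases hcc : c + 1 ≤ 2 <;> simp [hcc, h1], ?_, ?_, ?_, ?_⟩
    · rw [hiA, hiB, h2, List.map_map, List.map_map]
      refine List.map_congr_left ?_
      intro p hp
      by_cases hk : p.1 = keyCE l <;> simp [Function.comp_apply, hk]
    · have heq : (sa.2.items.map (fun p => if p.1 == keyCE l then (keyCE l, (c + 1, fl)) else p)).map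
          (fun p => (p.1, p.2.2)) = sa.2.items.map (fun p => (p.1, p.2.2)) := by
        rw [List.map_map]
        refine List.map_congr_left ?_
        intro p hp
        by_cases hk : p.1 = keyCE l
        · have hup := huniq p hp hk
          subst hup
          simp
        · simp [Function.comp_apply, hk]
      rw [hiA, heq, h3]
    · rw [hiA, List.map_map]
      have heq : sa.2.items.map (Prod.fst ∘ (fun p => if p.1 == keyCE l then (keyCE l, (c + 1, fl)) else p))
          = sa.2.items.map Prod.fst := by
        refine List.map_congr_left ?_
        intro p hp
        by_cases hk : p.1 = keyCE l <;> simp [Function.comp_apply, hk]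
      rw [heq]
      exact h4
    · intro p hp
      rw [hiA] at hp
      obtain ⟨q, hq, hpq⟩ := List.mem_map.mp hp
      by_cases hk : q.1 = keyCE l
      · rw [if_pos (by simpa using hk)] at hpq
        subst hpq
        simp only []
        omega
      · rw [if_neg (by simpa using hk)] at hpq
        subst hpq
        exact h5 q hq

lemma inv_foldl (T : PySem.Dict (List Char) Int) (E : List (List Char)) (sa) (sb)
    (h : InvCE T sa sb) : InvCE T (E.foldl stepA sa) (E.foldl (stepB T) sb) := by
  induction E generalizing sa sb with
  | nil => exact h
  | cons x xs ih => exact ih _ _ (inv_step T _ _ x h)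

lemma stepB_third (T : PySem.Dict (List Char) Int) (E : List (List Char)) (sb) :
    (E.foldl (stepB T) sb).2.2 =
      E.foldl (fun d l => d.insert (keyCE l) (d.getD (keyCE l) 0 + 1)) sb.2.2 := by
  induction E generalizing sb with
  | nil => rfl
  | cons x xs ih =>
    rw [List.foldl_cons, List.foldl_cons, ih]
    rfl

lemma portA_eq (evidence : String) (h0 : ¬ evidence.toList = []) :
    clean_evidence_py evidence =
      (fun st => finishCE (st.1 ++
        ((st.2.items.filter (fun p => decide (2 < p.2.1))).map (fun p => sumCE p.2.2 (p.2.1 - 2)))))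
      ((ECE evidence).foldl stepA ([], PySem.Dict.empty)) := by
  have hlamA : (fun (st : List (List Char) × PySem.Dict (List Char) (Int × List Char)) rawline =>
      let line := PySem.Chars.strip rawline
      if line = [] then st
      else
        let pp : List Char × List Char :=
          if PySem.Chars.isIn [':', ' '] line then
            let ps := PySem.Chars.splitOnMax line [':', ' '] 1
            (ps.headD [], ps.getD 1 [])
          else ([], line)
        let processed := if PySem.Chars.isIn [':', ' '] line
          then pp.1 ++ [':', ' '] ++ pp.2
          else line
        let patternKey := PySem.Chars.lower pp.2
        match st.2.get? patternKey with
        | some info =>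
            let info' : Int × List Char := (info.1 + 1, info.2)
            let seen' := st.2.insert patternKey info'
            if info'.1 ≤ 2 then (st.1 ++ [processed], seen') else (st.1, seen')
        | none =>
            (st.1 ++ [processed], st.2.insert patternKey (1, processed)))
      = fun st rawline =>
          if ¬ (PySem.Chars.strip rawline = []) then stepA st (PySem.Chars.strip rawline) else st := by
    funext st x
    by_cases hl : PySem.Chars.strip x = []
    · simp [hl]
    · by_cases hin : PySem.Chars.isIn [':', ' '] (PySem.Chars.strip x) = true
      · have hpe := proc_eq (PySem.Chars.strip x)
        rw [if_pos hin] at hpe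
        cases hg : st.2.get? (PySem.Chars.lower
            ((PySem.Chars.splitOnMax (PySem.Chars.strip x) [':', ' '] 1).getD 1 [])) with
        | none =>
          simp at hpe hg
          simp [hl, hin, stepA, keyCE, hpe, hg]
        | some info =>
          simp at hpe hg
          simp [hl, hin, stepA, keyCE, hpe, hg]
      · cases hg : st.2.get? (PySem.Chars.lower (PySem.Chars.strip x)) with
        | none =>
          try simp at hg
          simp [hl, hin, stepA, keyCE, hg]
        | some info =>
          try simp at hg
          simp [hl, hin, stepA, keyCE, hg]
  have hlamS : (fun (acc : List (List Char)) (kv : List Char × Int × List Char) =>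
      if kv.2.1 > 2 then
        let extra := kv.2.1 - 2
        if extra > 0 then
          if PySem.Chars.isIn [':', ' '] kv.2.2 then
            acc ++ [(PySem.Chars.splitOnMax kv.2.2 [':', ' '] 1).headD []
                    ++ [':', ' '] ++ ("... and ".toList ++ PySem.Int.toChars extra ++ " more similar items".toList)]
          else
            acc ++ ["... and ".toList ++ PySem.Int.toChars extra ++ " more similar items".toList]
        else acc
      else acc)
      = fun acc kv => if 2 < kv.2.1 then acc ++ [sumCE kv.2.2 (kv.2.1 - 2)] else acc := by
    funext acc kv
    unfold sumCE tailCE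
    by_cases h2 : 2 < kv.2.1
    · by_cases hin : PySem.Chars.isIn [':', ' '] kv.2.2 = true <;>
        simp [h2, hin, show (0:Int) < kv.2.1 - 2 by omega]
    · simp [h2]
  simp only [clean_evidence_py]
  rw [if_neg h0]
  rw [hlamA, hlamS]
  rw [show (fun (st : List (List Char) × PySem.Dict (List Char) (Int × List Char)) rawline =>
        if ¬ (PySem.Chars.strip rawline = []) then stepA st (PySem.Chars.strip rawline) else st)
      = (fun st l => (fun st' l' => if ¬ (l' = []) then stepA st' l' else st') st (PySem.Chars.strip l)) from rfl]
  rw [← List.foldl_map (f := PySem.Chars.strip)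
    (g := fun st' l' => if ¬ (l' = []) then stepA st' l' else st')]
  rw [PySem.List.foldl_ite_eq_foldl_filter (fun l => ¬ (l = [])) stepA]
  simp only [PySem.List.foldl_append_ite (fun (kv : List Char × Int × List Char) => 2 < kv.2.1)
    (fun kv => sumCE kv.2.2 (kv.2.1 - 2))]
  rfl

lemma foldl_insert_counter (E : List (List Char)) :
    E.foldl (fun (d : PySem.Dict (List Char) Int) l =>
      d.insert (keyCE l) (d.getD (keyCE l) 0 + 1)) PySem.Dict.empty
    = PySem.Dict.counter (E.map keyCE) := by
  rw [PySem.Dict.counter_eq_foldl, List.foldl_map]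
  rfl

lemma portB_eq (evidence : String) :
    clean_evidence_py_alt evidence =
      (fun st => finishCE (st.1 ++ st.2.1))
      ((ECE evidence).foldl
        (stepB (PySem.Dict.counter ((ECE evidence).map keyCE)))
        ([], [], PySem.Dict.empty)) := by
  have hlamT : (fun (d : PySem.Dict (List Char) Int) ln =>
      if ln = [] then d
      else
        let pat := if PySem.Chars.isIn [':', ' '] ln
          then (PySem.Chars.splitOnMax ln [':', ' '] 1).getD 1 [] else ln
        let key := PySem.Chars.lower pat
        d.insert key (d.getD key 0 + 1))
      = fun d ln => if ¬ (ln = []) then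
          (fun (d' : PySem.Dict (List Char) Int) l =>
            d'.insert (keyCE l) (d'.getD (keyCE l) 0 + 1)) d ln
        else d := by
    funext d ln
    by_cases hl : ln = [] <;> simp [hl, keyCE]
  have hlamB : ∀ (T : PySem.Dict (List Char) Int),
      (fun (st : List (List Char) × List (List Char) × PySem.Dict (List Char) Int) ln =>
      if ln = [] then st
      else
        let hasSep := PySem.Chars.isIn [':', ' '] ln
        let pp : List Char × List Char :=
          if hasSep then
            let ps := PySem.Chars.splitOnMax ln [':', ' '] 1
            (ps.headD [], ps.getD 1 [])
          else ([], ln)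
        let key := PySem.Chars.lower pp.2
        let n := st.2.2.getD key 0 + 1
        let kept := if n ≤ 2 then st.1 ++ [ln] else st.1
        let summaries :=
          if n = 1 ∧ 2 < T.getD key 0 then
            let tail := "... and ".toList ++ PySem.Int.toChars (T.getD key 0 - 2) ++ " more similar items".toList
            st.2.1 ++ [if hasSep then pp.1 ++ [':', ' '] ++ tail else tail]
          else st.2.1
        (kept, summaries, st.2.2.insert key n))
      = fun st ln => if ¬ (ln = []) then stepB T st ln else st := by
    intro T
    funext st ln
    by_cases hl : ln = []
    · simp [hl]
    · rw [if_neg hl, if_pos (by exact hl)]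
      by_cases hin : PySem.Chars.isIn [':', ' '] ln = true
      · simp only [hin, if_pos]
        unfold stepB keyCE sumCE tailCE
        simp [hin]
      · simp only [hin]
        unfold stepB keyCE sumCE tailCE
        simp [hin]
  simp only [clean_evidence_py_alt]
  rw [hlamT]
  rw [PySem.List.foldl_ite_eq_foldl_filter (fun (l : List Char) => ¬ (l = []))
    (fun (d' : PySem.Dict (List Char) Int) l => d'.insert (keyCE l) (d'.getD (keyCE l) 0 + 1))]
  rw [foldl_insert_counter]
  rw [hlamB]
  rw [PySem.List.foldl_ite_eq_foldl_filter (fun (l : List Char) => ¬ (l = [])) (stepB _)]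
  rfl

theorem ports_agree (evidence : String) :
    clean_evidence_py evidence = clean_evidence_py_alt evidence := by
  by_cases h0 : evidence.toList = []
  · simp only [clean_evidence_py, clean_evidence_py_alt, h0]
    rfl
  · rw [portA_eq evidence h0, portB_eq evidence]
    have hinv := inv_foldl (PySem.Dict.counter ((ECE evidence).map keyCE)) (ECE evidence)
      ([], PySem.Dict.empty) ([], [], PySem.Dict.empty)
      ⟨rfl, rfl, rfl, by simp [PySem.Dict.empty], by simp [PySem.Dict.empty]⟩
    obtain ⟨h1, h2, h3, h4, h5⟩ := hinv
    have hem : ((ECE evidence).foldl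
        (stepB (PySem.Dict.counter ((ECE evidence).map keyCE))) ([], [], PySem.Dict.empty)).2.2
        = PySem.Dict.counter ((ECE evidence).map keyCE) := by
      rw [stepB_third]
      exact foldl_insert_counter (ECE evidence)
    rw [hem] at h2
    have hTd : ∀ p ∈ ((ECE evidence).foldl stepA ([], PySem.Dict.empty)).2.items,
        (PySem.Dict.counter ((ECE evidence).map keyCE)).getD p.1 0 = p.2.1 := by
      intro p hp
      have hmemT : (p.1, p.2.1) ∈ (PySem.Dict.counter ((ECE evidence).map keyCE)).items := by
        rw [h2]
        exact List.mem_map_of_mem hp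
      have hnodT : ((PySem.Dict.counter ((ECE evidence).map keyCE)).items.map Prod.fst).Nodup := by
        rw [h2, List.map_map]
        exact h4
      have hg := get?_of_mem_nodup _ (p.1, p.2.1) hnodT hmemT
      simp [PySem.Dict.getD, hg]
    simp only []
    congr 1
    rw [h1, h3]
    congr 1
    rw [List.filter_map, List.map_map]
    rw [List.filter_congr (fun p hp => by
      rw [show (decide (2 < p.2.1)) = decide
        (2 < (PySem.Dict.counter ((ECE evidence).map keyCE)).getD p.1 0) from by rw [hTd p hp]])]
    refine List.map_congr_left ?_
    intro p hp
    have hpmem := List.mem_of_mem_filter hp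
    simp only [Function.comp_apply]
    rw [hTd p hpmem]

-- ===== VERDICT (by name: the statement is the Claim_ definition above) =====
theorem clean_evidence_py_spec : Claim_equal_clean_evidence_py := by
  intro evidence _
  exact ports_agree evidence
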